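-- pv_equiv track=rewrite | github.com/RafailTn/msc-thesis | src/feature_extraction.py | _mirna_pos_map
-- ===== SOURCE A (Python) =====
-- from typing import Dict, List, Optional
--
-- def _mirna_pos_map(vec: str) -> Dict[int, Optional[int]]:
--     """vector-index → 0-indexed miRNA position within the binding region."""
--     m: Dict[int, Optional[int]] = {}
--     pos = 0
--     for idx, ch in enumerate(vec):
--         if ch in '124Dd':
--             m[idx] = pos; pos += 1
--         elif ch in '3e':
--             m[idx] = None
--         else:
--             m[idx] = pos
--     return m
-- ===== SOURCE B (Python) =====
-- from typing import Dict, Optional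
-- from bisect import bisect_left
--
-- def _mirna_pos_map(vec: str) -> Dict[int, Optional[int]]:
--     """vector-index -> 0-indexed miRNA position, via binary search over marker indices."""
--     markers = [i for i, ch in enumerate(vec) if ch in '124Dd']
--     return {i: (None if ch in '3e' else bisect_left(markers, i))
--             for i, ch in enumerate(vec)}
-- ===== Notes on version B (the rewrite author's own statement) =====
-- stated objective: alternative
-- what changed: B drops A's running position counter entirely: it first collects the sorted list of marker-character indices, then computes each position by binary search (bisect_left) over that list, so the per-index answer is a search in a precomputed index structure instead of threaded loop state.
import Mathlib
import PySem

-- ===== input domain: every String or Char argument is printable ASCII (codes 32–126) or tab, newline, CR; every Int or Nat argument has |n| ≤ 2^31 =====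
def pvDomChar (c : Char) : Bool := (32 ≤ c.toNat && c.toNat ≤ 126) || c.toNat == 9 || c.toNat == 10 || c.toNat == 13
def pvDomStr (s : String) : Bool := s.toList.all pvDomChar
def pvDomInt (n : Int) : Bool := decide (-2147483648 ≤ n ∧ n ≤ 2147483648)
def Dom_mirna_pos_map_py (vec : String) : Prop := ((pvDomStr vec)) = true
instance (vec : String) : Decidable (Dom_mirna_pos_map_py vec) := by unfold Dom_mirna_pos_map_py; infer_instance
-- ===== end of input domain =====

-- B drops A's running counter: it collects the marker indices once and answers each
-- index by binary search (bisect_left) over that sorted list (objective: alternative).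

-- ===== PORT A =====
-- single fused pass: dict insert + running position counter
def mirna_pos_map_py (vec : String) : List (Int × Option Int) :=
  let st := (PySem.List.enumerate vec.toList).foldl
    (fun (st : PySem.Dict Int (Option Int) × Int) p =>
      if PySem.Chars.isIn [p.2] "124Dd".toList then (st.1.insert p.1 (some st.2), st.2 + 1)
      else if PySem.Chars.isIn [p.2] "3e".toList then (st.1.insert p.1 none, st.2)
      else (st.1.insert p.1 (some st.2), st.2))
    (PySem.Dict.empty, 0)
  st.1.items

-- ===== PORT B =====
-- bisect.bisect_left(a, x): the exact loop of CPython's bisect_left, lo/hi halving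
def pvBisectGo (a : List Int) (x : Int) (lo hi : Nat) : Nat :=
  if _h : lo < hi then
    let mid := (lo + hi) / 2
    if a.getD mid 0 < x then pvBisectGo a x (mid + 1) hi else pvBisectGo a x lo mid
  else lo
termination_by hi - lo
decreasing_by all_goals omega

-- markers = [i for i, ch in enumerate(vec) if ch in '124Dd']
def pvMarkers (cs : List Char) (s : Int) : List Int :=
  ((PySem.List.enumerate cs s).filter (fun p => PySem.Chars.isIn [p.2] "124Dd".toList)).map Prod.fst

def mirna_pos_map_py_alt (vec : String) : List (Int × Option Int) :=
  let markers := pvMarkers vec.toList 0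
  (PySem.List.enumerate vec.toList).map
    (fun p => (p.1, if PySem.Chars.isIn [p.2] "3e".toList then none
                    else some ((pvBisectGo markers p.1 0 markers.length : Nat) : Int)))

-- ===== PRECONDITION & SPEC =====
def Spec_mirna_pos_map_py (vec : String) (out : List (Int × Option Int)) : Prop := out = mirna_pos_map_py_alt vec
instance (vec : String) (out : List (Int × Option Int)) : Decidable (Spec_mirna_pos_map_py vec out) := by unfold Spec_mirna_pos_map_py; infer_instance

-- ===== CLAIM (what is proved, stated in full; the proofs are below) =====
def Claim_equal_mirna_pos_map_py : Prop := ∀ (vec : String), Dom_mirna_pos_map_py vec → Spec_mirna_pos_map_py vec (mirna_pos_map_py vec)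

-- ===== LEMMAS AND PROOFS =====

-- the common shape both programs compute, indexed by start index s and running position pos
def pvBuild (cs : List Char) (s pos : Int) : List (Int × Option Int) :=
  match cs with
  | [] => []
  | c :: t =>
    if PySem.Chars.isIn [c] "124Dd".toList then (s, some pos) :: pvBuild t (s+1) (pos+1)
    else if PySem.Chars.isIn [c] "3e".toList then (s, none) :: pvBuild t (s+1) pos
    else (s, some pos) :: pvBuild t (s+1) pos

-- A's fold appends pvBuild to the dict's items when every existing key is < s (so each insert is fresh)
theorem pvA_invariant (cs : List Char) (s pos : Int) (d : PySem.Dict Int (Option Int))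
    (h : ∀ k ∈ d.keys, k < s) :
    ((PySem.List.enumerate cs s).foldl
      (fun (st : PySem.Dict Int (Option Int) × Int) p =>
        if PySem.Chars.isIn [p.2] "124Dd".toList then (st.1.insert p.1 (some st.2), st.2 + 1)
        else if PySem.Chars.isIn [p.2] "3e".toList then (st.1.insert p.1 none, st.2)
        else (st.1.insert p.1 (some st.2), st.2))
      (d, pos)).1.items = d.items ++ pvBuild cs s pos := by
  induction cs generalizing s pos d with
  | nil => simp [pvBuild, PySem.List.enumerate_nil]
  | cons c t ih =>
    rw [PySem.List.enumerate_cons]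
    have hc : d.contains s = false := by
      cases hcb : d.contains s with
      | false => rfl
      | true =>
        have : s ∈ d.keys := (PySem.Dict.contains_iff_mem_keys d s).mp hcb
        exact absurd (h s this) (by omega)
    have hins : ∀ (v : Option Int), (d.insert s v).items = d.items ++ [(s, v)] :=
      fun v => PySem.Dict.items_insert_of_not_contains d v hc
    have hkeys : ∀ (v : Option Int) (k : Int), k ∈ (d.insert s v).keys → k < s + 1 := by
      intro v k hk
      rcases (PySem.Dict.mem_keys_insert d s k v).mp hk with h1 | h1
      · omega
      · exact lt_trans (h k h1) (by omega)
    simp only [List.foldl_cons]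
    by_cases h1 : PySem.Chars.isIn [c] "124Dd".toList = true
    · simp only [h1, if_pos]
      rw [ih (s+1) (pos+1) _ (hkeys _), hins, pvBuild, if_pos h1]
      simp
    · by_cases h2 : PySem.Chars.isIn [c] "3e".toList = true
      · simp only [h1, h2, if_neg, if_pos, Bool.not_eq_true]
        rw [ih (s+1) pos _ (hkeys _), hins, pvBuild, if_neg h1, if_pos h2]
        simp
      · simp only [h1, h2, if_neg, Bool.not_eq_true]
        rw [ih (s+1) pos _ (hkeys _), hins, pvBuild, if_neg h1, if_neg h2]
        simp

-- no character is in both '124Dd' and '3e'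
theorem pv_not_both (c : Char) (h1 : PySem.Chars.isIn [c] "124Dd".toList = true)
    (h2 : PySem.Chars.isIn [c] "3e".toList = true) : False := by
  have m1 : c ∈ "124Dd".toList := ((PySem.Chars.isIn_iff_infix _ _).mp h1).subset (List.mem_singleton_self c)
  have m2 : c ∈ "3e".toList := ((PySem.Chars.isIn_iff_infix _ _).mp h2).subset (List.mem_singleton_self c)
  simp at m1 m2
  rcases m1 with h|h|h|h|h <;> rcases m2 with g|g <;> simp [h] at g

-- unfolding pvMarkers on a cons
theorem pvMarkers_cons (c : Char) (t : List Char) (s : Int) :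
    pvMarkers (c :: t) s
      = (if PySem.Chars.isIn [c] "124Dd".toList then [s] else []) ++ pvMarkers t (s+1) := by
  simp only [pvMarkers, PySem.List.enumerate_cons, List.filter_cons]
  split_ifs <;> simp

-- every marker index is ≥ the start index
theorem pvMarkers_ge (cs : List Char) (s : Int) : ∀ x ∈ pvMarkers cs s, s ≤ x := by
  induction cs generalizing s with
  | nil => simp [pvMarkers, PySem.List.enumerate_nil]
  | cons c t ih =>
    intro x hx
    rw [pvMarkers_cons] at hx
    rcases List.mem_append.mp hx with h | h
    · by_cases h1 : PySem.Chars.isIn [c] "124Dd".toList = true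
      · rw [if_pos h1] at h; simp at h; omega
      · rw [if_neg h1] at h; simp at h
    · have := ih (s+1) x h; omega

-- the marker list is sorted (nondecreasing)
theorem pvMarkers_sorted (cs : List Char) (s : Int) : (pvMarkers cs s).Pairwise (· ≤ ·) := by
  induction cs generalizing s with
  | nil => simp [pvMarkers, PySem.List.enumerate_nil]
  | cons c t ih =>
    rw [pvMarkers_cons]
    by_cases h1 : PySem.Chars.isIn [c] "124Dd".toList = true
    · rw [if_pos h1]
      refine List.Pairwise.cons ?_ (ih (s+1))
      intro x hx
      have := pvMarkers_ge t (s+1) x hx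
      omega
    · rw [if_neg h1]
      simpa using ih (s+1)

-- on a sorted list, a[i] < x iff i < the number of elements < x
theorem pv_sorted_lt_iff (a : List Int) (ha : a.Pairwise (· ≤ ·)) (x : Int)
    (i : Nat) (hi : i < a.length) :
    (a[i] < x ↔ i < a.countP (fun y => decide (y < x))) := by
  induction a generalizing i with
  | nil => simp at hi
  | cons b t ih =>
    have hb : ∀ y ∈ t, b ≤ y := fun y hy => (List.pairwise_cons.mp ha).1 y hy
    have ht : t.Pairwise (· ≤ ·) := (List.pairwise_cons.mp ha).2
    have hcnt0 : ¬ b < x → t.countP (fun y => decide (y < x)) = 0 := by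
      intro hbx
      rw [List.countP_eq_zero]
      intro y hy
      simp only [decide_eq_true_eq]
      exact fun hlt => hbx (lt_of_le_of_lt (hb y hy) hlt)
    cases i with
    | zero =>
      simp only [List.getElem_cons_zero, List.countP_cons]
      by_cases hbx : b < x
      · simp [hbx]
      · simp [hbx, hcnt0 hbx]
    | succ j =>
      have hj : j < t.length := by simpa using hi
      simp only [List.getElem_cons_succ, List.countP_cons]
      by_cases hbx : b < x
      · have hd : (decide (b < x)) = true := by simpa using hbx
        rw [hd, if_pos rfl, ih ht j hj]
        omega
      · have h1 : ¬ t[j] < x := fun h => hbx (lt_of_le_of_lt (hb _ (List.getElem_mem hj)) h)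
        simp [hbx, h1, hcnt0 hbx]

-- CPython's bisect_left loop computes the count of elements < x on a sorted list
theorem pvBisectGo_eq (a : List Int) (ha : a.Pairwise (· ≤ ·)) (x : Int) :
    ∀ (n lo hi : Nat), hi - lo ≤ n → hi ≤ a.length →
      lo ≤ a.countP (fun y => decide (y < x)) → a.countP (fun y => decide (y < x)) ≤ hi →
      pvBisectGo a x lo hi = a.countP (fun y => decide (y < x)) := by
  intro n
  induction n with
  | zero =>
    intro lo hi h1 _ h3 h4
    rw [pvBisectGo]
    simp only [show ¬ lo < hi by omega, dite_false]
    omega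
  | succ m ih =>
    intro lo hi h1 h2 h3 h4
    rw [pvBisectGo]
    by_cases hlh : lo < hi
    · simp only [hlh, dite_true]
      have hmid : (lo + hi) / 2 < a.length := by omega
      have hget : a.getD ((lo + hi) / 2) 0 = a[(lo + hi) / 2] := List.getD_eq_getElem a 0 hmid
      have hiff := pv_sorted_lt_iff a ha x ((lo + hi) / 2) hmid
      by_cases hm : a.getD ((lo + hi) / 2) 0 < x
      · simp only [hm, if_pos]
        have : (lo + hi) / 2 < a.countP (fun y => decide (y < x)) := hiff.mp (hget ▸ hm)
        exact ih ((lo + hi) / 2 + 1) hi (by omega) h2 (by omega) h4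
      · simp only [hm]
        have : ¬ (lo + hi) / 2 < a.countP (fun y => decide (y < x)) :=
          fun h => hm (hget ▸ hiff.mpr h)
        exact ih lo ((lo + hi) / 2) (by omega) (by omega) h3 (by omega)
    · simp only [hlh, dite_false]
      omega

-- B's comprehension, with bisect replaced by the count, equals pvBuild:
-- m1 lists the markers strictly before s, pvMarkers cs s those at index ≥ s
theorem pvB_invariant (cs : List Char) (s : Int) (m1 : List Int) (hm1 : ∀ k ∈ m1, k < s) :
    (PySem.List.enumerate cs s).map
      (fun p => (p.1, if PySem.Chars.isIn [p.2] "3e".toList then none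
                      else some (((m1 ++ pvMarkers cs s).countP (fun y => decide (y < p.1)) : Nat) : Int)))
      = pvBuild cs s (m1.length : Int) := by
  induction cs generalizing s m1 with
  | nil => simp [pvBuild, PySem.List.enumerate_nil]
  | cons c t ih =>
    have hms : ∀ x ∈ pvMarkers (c :: t) s, ¬ x < s :=
      fun x hx => not_lt.mpr (pvMarkers_ge (c :: t) s x hx)
    have hcnt_s : (m1 ++ pvMarkers (c :: t) s).countP (fun y => decide (y < s)) = m1.length := by
      rw [List.countP_append]
      have e1 : m1.countP (fun y => decide (y < s)) = m1.length :=
        List.countP_eq_length.mpr (fun y hy => decide_eq_true (hm1 y hy))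
      have e2 : (pvMarkers (c :: t) s).countP (fun y => decide (y < s)) = 0 :=
        List.countP_eq_zero.mpr (fun y hy => by simpa using hms y hy)
      omega
    have hc := pvMarkers_cons c t s
    simp only [PySem.List.enumerate_cons, List.map_cons]
    by_cases h1 : PySem.Chars.isIn [c] "124Dd".toList = true
    · by_cases h2 : PySem.Chars.isIn [c] "3e".toList = true
      · exact (pv_not_both c h1 h2).elim
      · rw [pvBuild, if_pos h1]
        have hl : m1 ++ pvMarkers (c :: t) s = (m1 ++ [s]) ++ pvMarkers t (s+1) := by
          rw [hc, if_pos h1]; simp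
        congr 1
        · rw [if_neg h2, hcnt_s]
        · simp only [hl]
          have hih := ih (s+1) (m1 ++ [s]) (by
            intro k hk
            rcases List.mem_append.mp hk with h | h
            · have := hm1 k h; omega
            · simp at h; omega)
          rw [hih]
          congr 1
          simp
    · have hl : m1 ++ pvMarkers (c :: t) s = m1 ++ pvMarkers t (s+1) := by
        rw [hc, if_neg h1]; simp
      have hih := ih (s+1) m1 (by intro k hk; have := hm1 k hk; omega)
      rw [pvBuild, if_neg h1]
      by_cases h2 : PySem.Chars.isIn [c] "3e".toList = true
      · simp only [if_pos h2]
        exact congrArg (List.cons _) (by simp only [hl]; exact hih)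
      · simp only [if_neg h2]
        rw [hcnt_s, hl, hih]

-- ===== VERDICT (by name: the statement is the Claim_ definition above) =====
theorem mirna_pos_map_py_spec : Claim_equal_mirna_pos_map_py := by
  intro vec _
  unfold Spec_mirna_pos_map_py mirna_pos_map_py mirna_pos_map_py_alt
  rw [pvA_invariant vec.toList 0 0 PySem.Dict.empty (by simp [PySem.Dict.keys_empty])]
  have hsorted := pvMarkers_sorted vec.toList 0
  have hbis : ∀ p ∈ PySem.List.enumerate vec.toList,
      (fun p : Int × Char => (p.1, if PySem.Chars.isIn [p.2] "3e".toList then none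
            else some ((pvBisectGo (pvMarkers vec.toList 0) p.1 0 (pvMarkers vec.toList 0).length : Nat) : Int))) p
      = (fun p : Int × Char => (p.1, if PySem.Chars.isIn [p.2] "3e".toList then none
            else some (((([] : List Int) ++ pvMarkers vec.toList 0).countP (fun y => decide (y < p.1)) : Nat) : Int))) p := by
    intro p _
    simp only [List.nil_append]
    by_cases h2 : PySem.Chars.isIn [p.2] "3e".toList = true
    · simp only [if_pos h2]
    · simp only [if_neg h2]
      have heq := pvBisectGo_eq (pvMarkers vec.toList 0) hsorted p.1
        (pvMarkers vec.toList 0).length 0 (pvMarkers vec.toList 0).length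
        (by omega) (le_refl _) (by omega) List.countP_le_length
      rw [heq]
  rw [List.map_congr_left hbis, pvB_invariant vec.toList 0 [] (by simp)]
  simp [PySem.Dict.empty]
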